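-- pv_equiv track=rewrite | github.com/tarekfb/emi-processing | emi.py | keep_lines_with_empty_previous
-- ===== SOURCE A (Python) =====
-- def keep_lines_with_empty_previous(lines):
--     cleaned_lines = []
--
--     for i in range(len(lines)):
--         if i == 0 or lines[i-1].strip() == "":
--             cleaned_lines.append(lines[i])
--
--     previous_line_empty = False
--
--     cleaned_lines = remove_one_of_two_empty_lines(cleaned_lines)
--
--     return cleaned_lines
--
-- def remove_one_of_two_empty_lines(lines):
--     cleaned_lines = []
--     previous_line_empty = False
--
--     for line in lines:
--         current_line_empty = line.strip() == ""
--         if not (previous_line_empty and current_line_empty):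
--             cleaned_lines.append(line)
--         previous_line_empty = current_line_empty
--
--     return cleaned_lines
-- ===== SOURCE B (Python) =====
-- def keep_lines_with_empty_previous(lines):
--     result = []
--     prev_kept_empty = False
--     for i in range(len(lines)):
--         if i == 0 or lines[i - 1].strip() == "":
--             current_empty = lines[i].strip() == ""
--             if not (prev_kept_empty and current_empty):
--                 result.append(lines[i])
--             prev_kept_empty = current_empty
--     return result
-- ===== Notes on version B (the rewrite author's own statement) =====
-- stated objective: alternative
-- what changed: A runs two sequential passes (select lines whose previous line is blank, then a second pass deduping consecutive blanks); B fuses both into a single indexed loop carrying one 'previous kept line was blank' boolean, with no helper function and no intermediate list.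
import Mathlib
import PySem

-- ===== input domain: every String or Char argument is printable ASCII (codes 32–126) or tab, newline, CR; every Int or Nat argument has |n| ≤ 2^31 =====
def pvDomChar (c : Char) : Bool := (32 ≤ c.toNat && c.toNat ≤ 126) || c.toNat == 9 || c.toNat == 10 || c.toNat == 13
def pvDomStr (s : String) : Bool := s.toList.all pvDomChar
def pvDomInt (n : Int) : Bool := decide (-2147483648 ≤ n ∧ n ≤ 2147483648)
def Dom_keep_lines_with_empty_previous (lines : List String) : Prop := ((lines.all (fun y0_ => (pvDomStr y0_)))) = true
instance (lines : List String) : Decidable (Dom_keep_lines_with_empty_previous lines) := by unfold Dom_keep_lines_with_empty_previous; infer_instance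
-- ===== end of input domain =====

-- B fuses A's two sequential passes (select lines after blank lines, then dedupe
-- consecutive blanks) into one indexed loop carrying a single boolean of state; same
-- O(n) cost, a single traversal instead of two ('alternative' objective).

-- ===== PORT A =====
def remove_one_of_two_empty_lines (lines : List String) : List String :=
  (lines.foldl
    (fun (s : List String × Bool) line =>
      let current_line_empty := PySem.Str.strip line == ""
      (if !(s.2 && current_line_empty) then s.1 ++ [line] else s.1, current_line_empty))
    ([], false)).1

def keep_lines_with_empty_previous (lines : List String) : List String :=
  let cleaned_lines :=
    (PySem.List.pyRange 0 (lines.length : Int) 1).foldl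
      (fun acc i =>
        if i == 0 || PySem.Str.strip (PySem.List.pyGetD lines (i - 1) "") == "" then
          acc ++ [PySem.List.pyGetD lines i ""]
        else acc)
      []
  remove_one_of_two_empty_lines cleaned_lines

-- ===== PORT B =====
def keep_lines_with_empty_previous_alt (lines : List String) : List String :=
  ((PySem.List.pyRange 0 (lines.length : Int) 1).foldl
    (fun (s : List String × Bool) i =>
      if i == 0 || PySem.Str.strip (PySem.List.pyGetD lines (i - 1) "") == "" then
        let current_empty := PySem.Str.strip (PySem.List.pyGetD lines i "") == ""
        (if !(s.2 && current_empty) then s.1 ++ [PySem.List.pyGetD lines i ""] else s.1,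
         current_empty)
      else s)
    ([], false)).1

-- ===== PRECONDITION & SPEC =====
def Spec_keep_lines_with_empty_previous (lines : List String) (out : List String) : Prop := out = keep_lines_with_empty_previous_alt lines
instance (lines : List String) (out : List String) : Decidable (Spec_keep_lines_with_empty_previous lines out) := by unfold Spec_keep_lines_with_empty_previous; infer_instance

-- ===== CLAIM (what is proved, stated in full; the proofs are below) =====
def Claim_equal_keep_lines_with_empty_previous : Prop := ∀ (lines : List String), Dom_keep_lines_with_empty_previous lines → Spec_keep_lines_with_empty_previous lines (keep_lines_with_empty_previous lines)

-- ===== LEMMAS AND PROOFS =====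

-- B's fused fold over a list of indices equals pass 2's fold run over the sublist
-- that pass 1 selects from those indices.
theorem bfold_eq_p2fold (lines : List String) (I : List Int) (s : List String × Bool) :
    I.foldl
      (fun (s : List String × Bool) i =>
        if i == 0 || PySem.Str.strip (PySem.List.pyGetD lines (i - 1) "") == "" then
          let current_empty := PySem.Str.strip (PySem.List.pyGetD lines i "") == ""
          (if !(s.2 && current_empty) then s.1 ++ [PySem.List.pyGetD lines i ""] else s.1,
           current_empty)
        else s) s
    =
    ((I.filter
        (fun i => i == 0 || PySem.Str.strip (PySem.List.pyGetD lines (i - 1) "") == "")).map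
        (fun i => PySem.List.pyGetD lines i "")).foldl
      (fun (s : List String × Bool) line =>
        let current_line_empty := PySem.Str.strip line == ""
        (if !(s.2 && current_line_empty) then s.1 ++ [line] else s.1, current_line_empty)) s := by
  induction I generalizing s with
  | nil => rfl
  | cons i I ih =>
    simp only [List.foldl_cons, List.filter_cons]
    by_cases h : (i == 0 || PySem.Str.strip (PySem.List.pyGetD lines (i - 1) "") == "") = true
    · rw [if_pos h, if_pos h, List.map_cons, List.foldl_cons]
      exact ih _
    · rw [if_neg h, if_neg h]
      exact ih _

-- ===== VERDICT (by name: the statement is the Claim_ definition above) =====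
theorem keep_lines_with_empty_previous_spec : Claim_equal_keep_lines_with_empty_previous := by
  intro lines _
  show keep_lines_with_empty_previous lines = keep_lines_with_empty_previous_alt lines
  unfold keep_lines_with_empty_previous keep_lines_with_empty_previous_alt
    remove_one_of_two_empty_lines
  rw [PySem.List.foldl_append_if, bfold_eq_p2fold]
  simp
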